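-- pv_equiv track=rewrite | github.com/OrthoFinder/OGtoberfest | src/ogtoberfest/scorefuncs.py | V_raw_to_V_prime
-- ===== SOURCE A (Python) =====
-- def V_raw_to_V_prime(U, V_raw):
--     """
--     V_raw: Dict[predog_key], predog_set]
--         consists of all the predogs, it can contain genes that don't belong to any of the refogs.
--
--     V_prime: Dict[refog_key, Dict[predog_key], predog_set]]
--         a set of predogs that share some genes with the refogs.
--         For each refog, it can have more than one corresponding predogs.
--     """
--
--     V_prime = {}
--     for refog_key, refog in U.items():
--         V_prime[refog_key] = {}
--         for predog_key, predog in V_raw.items():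
--             if predog_key == "unassigned_genes":
--                 continue
--             overlap = refog & predog
--             if len(overlap) != 0:
--                 if predog_key not in V_prime[refog_key]:
--                     V_prime[refog_key][predog_key] = predog
--     return V_prime
-- ===== SOURCE B (Python) =====
-- def V_raw_to_V_prime(U, V_raw):
--     # Inverted index: gene -> list of predog keys containing it.
--     index = {}
--     for predog_key, predog in V_raw.items():
--         if predog_key == "unassigned_genes":
--             continue
--         for g in predog:
--             index.setdefault(g, []).append(predog_key)
--     V_prime = {}
--     for refog_key, refog in U.items():
--         hits = set()
--         for g in refog:
--             hits.update(index.get(g, ()))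
--         V_prime[refog_key] = {pk: pd for pk, pd in V_raw.items() if pk in hits}
--     return V_prime
-- ===== Notes on version B (the rewrite author's own statement) =====
-- stated objective: alternative
-- what changed: Replaced the nested loop computing a set intersection for every (refog, predog) pair by an inverted gene->predog-keys index built once; each refog then looks up its own genes and filters V_raw by membership in the resulting hit set (different algorithm; not confirmed faster at the largest measured size).
import Mathlib
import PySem

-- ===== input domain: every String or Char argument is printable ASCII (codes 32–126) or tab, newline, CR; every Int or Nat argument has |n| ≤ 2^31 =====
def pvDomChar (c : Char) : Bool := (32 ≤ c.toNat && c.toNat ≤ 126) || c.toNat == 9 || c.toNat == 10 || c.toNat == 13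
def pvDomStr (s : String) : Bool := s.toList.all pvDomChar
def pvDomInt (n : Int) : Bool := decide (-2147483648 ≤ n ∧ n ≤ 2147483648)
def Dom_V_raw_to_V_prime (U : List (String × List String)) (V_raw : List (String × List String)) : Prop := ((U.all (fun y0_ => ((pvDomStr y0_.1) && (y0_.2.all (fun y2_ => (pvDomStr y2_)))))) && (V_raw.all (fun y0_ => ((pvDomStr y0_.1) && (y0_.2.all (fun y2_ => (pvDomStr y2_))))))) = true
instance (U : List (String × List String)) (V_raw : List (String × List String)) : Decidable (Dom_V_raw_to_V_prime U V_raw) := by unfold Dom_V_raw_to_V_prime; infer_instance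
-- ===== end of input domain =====

-- ===== PORT A =====
-- B replaces A's per-(refog,predog) set intersections by an inverted gene->predog-keys index (objective: alternative algorithm).
-- Both Pythons take dicts; under Pre_ (no duplicate keys) dict insertion into a fresh dict is exactly appending, which is
-- how both ports render their dict-building loops.
def V_raw_to_V_prime (U : List (String × List String)) (V_raw : List (String × List String)) : List (String × List (String × List String)) :=
  U.foldl (fun Vp p =>
    -- V_prime[refog_key] = {} ; then the inner loop over V_raw fills it
    Vp ++ [(p.1,
      V_raw.foldl (fun inner q =>
        if q.1 == "unassigned_genes" then inner   -- continue
        else if PySem.Set.len (PySem.Set.inter p.2 q.2) != 0 then  -- overlap = refog & predog; len(overlap) != 0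
          if inner.all (fun r => !(r.1 == q.1)) then  -- predog_key not in V_prime[refog_key]
            inner ++ [(q.1, q.2)]
          else inner
        else inner) [])]) []

-- ===== PORT B =====
-- index = {}; for predog_key, predog in V_raw.items(): for g in predog: index.setdefault(g, []).append(predog_key)
def pvIndex (V_raw : List (String × List String)) : PySem.Dict String (List String) :=
  V_raw.foldl (fun d q =>
    if q.1 == "unassigned_genes" then d
    else q.2.foldl (fun d g => d.modify g [] (fun ks => ks ++ [q.1])) d) PySem.Dict.empty

-- hits = set(); for g in refog: hits.update(index.get(g, ()))
def pvHits (index : PySem.Dict String (List String)) (refog : List String) : PySem.Set String :=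
  refog.foldl (fun s g => PySem.Set.update s (index.getD g [])) PySem.Set.empty

def V_raw_to_V_prime_alt (U : List (String × List String)) (V_raw : List (String × List String)) : List (String × List (String × List String)) :=
  U.foldl (fun Vp p =>
    -- {pk: pd for pk, pd in V_raw.items() if pk in hits}
    Vp ++ [(p.1, V_raw.filter (fun q => PySem.Set.contains (pvHits (pvIndex V_raw) p.2) q.1))]) []

-- ===== PRECONDITION & SPEC =====
-- Pre_ excludes association lists with duplicate keys: both Python parameters are dicts, which cannot hold a
-- duplicate key, so such lists do not represent any input A actually receives.
def Pre_V_raw_to_V_prime (U : List (String × List String)) (V_raw : List (String × List String)) : Prop :=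
  (U.map Prod.fst).Nodup ∧ (V_raw.map Prod.fst).Nodup
instance (U : List (String × List String)) (V_raw : List (String × List String)) : Decidable (Pre_V_raw_to_V_prime U V_raw) := by unfold Pre_V_raw_to_V_prime; infer_instance
def pvWitness_V_raw_to_V_prime : (List (String × List String)) × (List (String × List String)) :=
  ([("r1", ["g1"])], [("p1", ["g1", "g2"]), ("unassigned_genes", ["g3"])])
def Spec_V_raw_to_V_prime (U : List (String × List String)) (V_raw : List (String × List String)) (out : List (String × List (String × List String))) : Prop := out = V_raw_to_V_prime_alt U V_raw
instance (U : List (String × List String)) (V_raw : List (String × List String)) (out : List (String × List (String × List String))) : Decidable (Spec_V_raw_to_V_prime U V_raw out) := by unfold Spec_V_raw_to_V_prime; infer_instance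

-- ===== CLAIM (what is proved, stated in full; the proofs are below) =====
def Claim_equal_V_raw_to_V_prime : Prop := ∀ (U : List (String × List String)) (V_raw : List (String × List String)), Dom_V_raw_to_V_prime U V_raw → Pre_V_raw_to_V_prime U V_raw → Spec_V_raw_to_V_prime U V_raw (V_raw_to_V_prime U V_raw)

-- ===== LEMMAS AND PROOFS =====

-- in a list whose first components are Nodup, a pair is determined by its first component
lemma pv_fst_nodup_eq {α β : Type} (V : List (α × β)) (h : (V.map Prod.fst).Nodup)
    {p q : α × β} (hp : p ∈ V) (hq : q ∈ V) (he : p.1 = q.1) : p = q := by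
  induction V with
  | nil => cases hp
  | cons a V ih =>
    simp only [List.map_cons, List.nodup_cons] at h
    rcases List.mem_cons.1 hp with rfl | hp' <;> rcases List.mem_cons.1 hq with rfl | hq'
    · rfl
    · exact absurd (he ▸ List.mem_map_of_mem hq') h.1
    · exact absurd (he ▸ List.mem_map_of_mem hp') h.1
    · exact ih h.2 hp' hq'

-- A's inner loop over V_raw is a filter, as long as the accumulator's keys are disjoint from V's keys
lemma pv_innerA_eq (refog : List String) (V : List (String × List String))
    (hnd : (V.map Prod.fst).Nodup) (acc : List (String × List String))
    (hdisj : ∀ r ∈ acc, r.1 ∉ V.map Prod.fst) :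
    V.foldl (fun inner q =>
      if q.1 == "unassigned_genes" then inner
      else if PySem.Set.len (PySem.Set.inter refog q.2) != 0 then
        if inner.all (fun r => !(r.1 == q.1)) then inner ++ [(q.1, q.2)] else inner
      else inner) acc
    = acc ++ V.filter (fun q => !(q.1 == "unassigned_genes") && PySem.Set.len (PySem.Set.inter refog q.2) != 0) := by
  induction V generalizing acc with
  | nil => simp
  | cons q V ih =>
    simp only [List.map_cons, List.nodup_cons] at hnd
    have hdisj' : ∀ r ∈ acc, r.1 ∉ V.map Prod.fst := by
      intro r hr hm
      exact hdisj r hr (by simp only [List.map_cons, List.mem_cons]; exact Or.inr hm)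
    rw [List.foldl_cons, List.filter_cons]
    by_cases hu : (q.1 == "unassigned_genes") = true
    · simp only [hu, Bool.not_true, Bool.false_and, Bool.false_eq_true, reduceIte]
      exact ih hnd.2 acc hdisj'
    · rw [Bool.not_eq_true] at hu
      simp only [hu, Bool.false_eq_true, reduceIte, Bool.not_false, Bool.true_and]
      by_cases hov : (PySem.Set.len (PySem.Set.inter refog q.2) != 0) = true
      · have hall : (acc.all fun r => !(r.1 == q.1)) = true := by
          simp only [List.all_eq_true, Bool.not_eq_true', beq_eq_false_iff_ne]
          intro r hr he
          exact hdisj r hr (by simp only [List.map_cons, List.mem_cons]; exact Or.inl he)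
        simp only [hov, hall, reduceIte]
        rw [ih hnd.2 (acc ++ [(q.1, q.2)]) (by
          intro r hr hm
          rcases List.mem_append.1 hr with hr' | hr'
          · exact hdisj' r hr' hm
          · have : r = (q.1, q.2) := by simpa using hr'
            rw [this] at hm
            exact hnd.1 hm)]
        simp
      · rw [Bool.not_eq_true] at hov
        simp only [hov, Bool.false_eq_true, reduceIte]
        exact ih hnd.2 acc hdisj'

-- gene/key pairs listed by B's index-building double loop
def pvPairs (V : List (String × List String)) : List (String × String) :=
  V.flatMap (fun q => if q.1 == "unassigned_genes" then [] else q.2.map (fun g => (g, q.1)))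

-- B's double loop builds the same dict as a single fold over pvPairs
lemma pv_index_eq (V : List (String × List String)) (d : PySem.Dict String (List String)) :
    V.foldl (fun d q =>
      if q.1 == "unassigned_genes" then d
      else q.2.foldl (fun d g => d.modify g [] (fun ks => ks ++ [q.1])) d) d
    = (pvPairs V).foldl (fun d pr => d.modify pr.1 [] (fun ks => ks ++ [pr.2])) d := by
  induction V generalizing d with
  | nil => simp [pvPairs]
  | cons q V ih =>
    simp only [pvPairs, List.flatMap_cons, List.foldl_append, List.foldl_cons]
    by_cases hu : (q.1 == "unassigned_genes") = true
    · simp only [hu, reduceIte, List.foldl_nil]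
      simpa only [pvPairs] using ih d
    · rw [Bool.not_eq_true] at hu
      simp only [hu, Bool.false_eq_true, reduceIte, List.foldl_map]
      rw [ih]
      simp only [pvPairs]

-- what B's hit set contains
lemma pv_mem_hits (index : PySem.Dict String (List String)) (refog : List String)
    (s : PySem.Set String) (x : String) :
    x ∈ refog.foldl (fun s g => PySem.Set.update s (index.getD g [])) s
      ↔ x ∈ s ∨ ∃ g ∈ refog, x ∈ index.getD g [] := by
  induction refog generalizing s with
  | nil => simp
  | cons g refog ih =>
    rw [List.foldl_cons, ih]
    simp only [PySem.Set.update_eq_append_filter, List.mem_append, List.mem_filter,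
      PySem.Set.mem_ofList, List.mem_cons]
    constructor
    · rintro (⟨h | ⟨h, _⟩⟩ | ⟨g', hg', hx⟩)
      · exact Or.inl h
      · exact Or.inr ⟨g, Or.inl rfl, h⟩
      · exact Or.inr ⟨g', Or.inr hg', hx⟩
    · rintro (h | ⟨g', hg' | hg', hx⟩)
      · exact Or.inl (Or.inl h)
      · subst hg'
        by_cases hs : PySem.Set.contains s x = true
        · exact Or.inl (Or.inl (by simpa [PySem.Set.contains, List.contains_iff_mem] using hs))
        · exact Or.inl (Or.inr ⟨hx, by simpa using hs⟩)
      · exact Or.inr ⟨g', hg', hx⟩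

-- main inner-value lemma: for each refog, A's inner dict equals B's filtered V_raw
lemma pv_inner_eq (refog : List String) (V : List (String × List String))
    (hnd : (V.map Prod.fst).Nodup) :
    V.foldl (fun inner q =>
      if q.1 == "unassigned_genes" then inner
      else if PySem.Set.len (PySem.Set.inter refog q.2) != 0 then
        if inner.all (fun r => !(r.1 == q.1)) then inner ++ [(q.1, q.2)] else inner
      else inner) []
    = V.filter (fun q => PySem.Set.contains (pvHits (pvIndex V) refog) q.1) := by
  unfold pvHits pvIndex
  rw [pv_innerA_eq refog V hnd [] (by simp), List.nil_append]
  apply List.filter_congr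
  intro q hq
  have hidx : ∀ g x, x ∈ ((V.foldl (fun d q =>
      if q.1 == "unassigned_genes" then d
      else q.2.foldl (fun d g => d.modify g [] (fun ks => ks ++ [q.1])) d) PySem.Dict.empty).getD g [])
      ↔ ∃ q' ∈ V, ¬ q'.1 = "unassigned_genes" ∧ g ∈ q'.2 ∧ q'.1 = x := by
    intro g x
    rw [pv_index_eq, PySem.Dict.getD_foldl_modify_append]
    have h0 : (PySem.Dict.empty : PySem.Dict String (List String)).getD g [] = [] := rfl
    rw [h0, List.nil_append]
    simp only [pvPairs, List.mem_map, List.mem_filter, List.mem_flatMap]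
    constructor
    · rintro ⟨pr, ⟨⟨q', hq', hpr⟩, hfst⟩, rfl⟩
      by_cases hu : (q'.1 == "unassigned_genes") = true
      · simp [hu] at hpr
      · rw [Bool.not_eq_true] at hu
        simp only [hu, Bool.false_eq_true, reduceIte, List.mem_map] at hpr
        obtain ⟨g', hg', rfl⟩ := hpr
        refine ⟨q', hq', by simpa using hu, ?_, rfl⟩
        simpa using (beq_iff_eq.1 hfst) ▸ hg'
    · rintro ⟨q', hq', hu, hg, rfl⟩
      refine ⟨(g, q'.1), ⟨⟨q', hq', ?_⟩, by simp⟩, rfl⟩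
      have hu' : (q'.1 == "unassigned_genes") = false := by simpa using hu
      simp only [hu', Bool.false_eq_true, reduceIte, List.mem_map]
      exact ⟨g, hg, rfl⟩
  have hcontains : PySem.Set.contains
      (refog.foldl (fun s g => PySem.Set.update s ((V.foldl (fun d q =>
        if q.1 == "unassigned_genes" then d
        else q.2.foldl (fun d g => d.modify g [] (fun ks => ks ++ [q.1])) d) PySem.Dict.empty).getD g []))
        PySem.Set.empty) q.1
      = decide (∃ g ∈ refog, ∃ q' ∈ V, ¬ q'.1 = "unassigned_genes" ∧ g ∈ q'.2 ∧ q'.1 = q.1) := by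
    rcases Bool.eq_false_or_eq_true (PySem.Set.contains
      (refog.foldl (fun s g => PySem.Set.update s ((V.foldl (fun d q =>
        if q.1 == "unassigned_genes" then d
        else q.2.foldl (fun d g => d.modify g [] (fun ks => ks ++ [q.1])) d) PySem.Dict.empty).getD g []))
        PySem.Set.empty) q.1) with hb | hb <;> rw [hb] <;> symm
    · apply decide_eq_true
      have hmem : q.1 ∈ refog.foldl (fun s g => PySem.Set.update s ((V.foldl (fun d q =>
          if q.1 == "unassigned_genes" then d
          else q.2.foldl (fun d g => d.modify g [] (fun ks => ks ++ [q.1])) d) PySem.Dict.empty).getD g []))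
          PySem.Set.empty := by
        simpa [PySem.Set.contains, List.contains_iff_mem] using hb
      rcases (pv_mem_hits _ _ _ _).1 hmem with h | ⟨g, hg, hx⟩
      · simp [PySem.Set.empty] at h
      · exact ⟨g, hg, (hidx g q.1).1 hx⟩
    · apply decide_eq_false
      rintro ⟨g, hg, hx⟩
      have hmem : q.1 ∈ refog.foldl (fun s g => PySem.Set.update s ((V.foldl (fun d q =>
          if q.1 == "unassigned_genes" then d
          else q.2.foldl (fun d g => d.modify g [] (fun ks => ks ++ [q.1])) d) PySem.Dict.empty).getD g []))
          PySem.Set.empty :=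
        (pv_mem_hits _ _ _ _).2 (Or.inr ⟨g, hg, (hidx g q.1).2 hx⟩)
      have htrue : PySem.Set.contains (refog.foldl (fun s g => PySem.Set.update s ((V.foldl (fun d q =>
          if q.1 == "unassigned_genes" then d
          else q.2.foldl (fun d g => d.modify g [] (fun ks => ks ++ [q.1])) d) PySem.Dict.empty).getD g []))
          PySem.Set.empty) q.1 = true := by
        simpa [PySem.Set.contains, List.contains_iff_mem] using hmem
      rw [htrue] at hb
      cases hb
  rw [hcontains]
  rcases Bool.eq_false_or_eq_true (q.1 == "unassigned_genes") with hu | hu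
  · -- q is "unassigned_genes": both sides false
    simp only [hu, Bool.not_true, Bool.false_and]
    symm
    apply decide_eq_false
    rintro ⟨g, hg, q', hq', hu', hgq', he⟩
    have hqq : q' = q := pv_fst_nodup_eq V hnd hq' hq he
    subst hqq
    exact hu' (beq_iff_eq.1 hu)
  · simp only [hu, Bool.not_false, Bool.true_and]
    have hune : ¬ q.1 = "unassigned_genes" := by simpa using hu
    rcases Bool.eq_false_or_eq_true (PySem.Set.len (PySem.Set.inter refog q.2) != 0) with hov | hov <;> rw [hov] <;> symm
    · apply decide_eq_true
      have hnnil : PySem.Set.inter refog q.2 ≠ [] := by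
        intro hnil
        rw [hnil] at hov
        simp [PySem.Set.len] at hov
      obtain ⟨g, hg⟩ : ∃ g, g ∈ PySem.Set.inter refog q.2 :=
        List.exists_mem_of_ne_nil _ hnnil
      have hg' := hg
      simp only [PySem.Set.inter, List.mem_filter] at hg'
      exact ⟨g, hg'.1, q, hq, hune, by simpa [List.contains_iff_mem] using hg'.2, rfl⟩
    · apply decide_eq_false
      rintro ⟨g, hg, q', hq', hu', hgq', he⟩
      have hqq : q' = q := pv_fst_nodup_eq V hnd hq' hq he
      subst hqq
      have hz : PySem.Set.inter refog q'.2 = [] := by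
        have hz0 : PySem.Set.len (PySem.Set.inter refog q'.2) = 0 := by simpa using hov
        simpa [PySem.Set.len, Nat.cast_eq_zero, List.length_eq_zero_iff] using hz0
      have hgmem : g ∈ PySem.Set.inter refog q'.2 := by
        simp only [PySem.Set.inter, List.mem_filter]
        exact ⟨hg, by simpa [PySem.Set.contains, List.contains_iff_mem] using hgq'⟩
      rw [hz] at hgmem
      cases hgmem

-- the shared outer loop over U, with the per-refog values rewritten by pv_inner_eq
lemma pv_outer_eq (V_raw : List (String × List String)) (hnd : (V_raw.map Prod.fst).Nodup)
    (U : List (String × List String)) (acc : List (String × List (String × List String))) :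
    U.foldl (fun Vp p =>
      Vp ++ [(p.1,
        V_raw.foldl (fun inner q =>
          if q.1 == "unassigned_genes" then inner
          else if PySem.Set.len (PySem.Set.inter p.2 q.2) != 0 then
            if inner.all (fun r => !(r.1 == q.1)) then inner ++ [(q.1, q.2)] else inner
          else inner) [])]) acc
    = U.foldl (fun Vp p =>
        Vp ++ [(p.1, V_raw.filter (fun q => PySem.Set.contains (pvHits (pvIndex V_raw) p.2) q.1))]) acc := by
  induction U generalizing acc with
  | nil => rfl
  | cons p U ih =>
    rw [List.foldl_cons, List.foldl_cons, pv_inner_eq p.2 V_raw hnd]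
    exact ih _

-- ===== VERDICT (by name: the statement is the Claim_ definition above) =====
theorem V_raw_to_V_prime_spec : Claim_equal_V_raw_to_V_prime := by
  intro U V_raw _ hpre
  unfold Spec_V_raw_to_V_prime V_raw_to_V_prime V_raw_to_V_prime_alt
  exact pv_outer_eq V_raw hpre.2 U []
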